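-- pv_equiv track=rewrite | github.com/lollipop690/SC1003-Mini-Project | assets/automate.py | students_by_tg
-- ===== SOURCE A (Python) =====
-- def students_by_tg(student_data): #reads the output list of list from the previous function
--     tutorial_groups = {} #empty dict
--     for student in student_data:
--         tg = student["Tutorial Group"] #initialising tg variable to the tg of indv students
--         if tg not in tutorial_groups:
--             tutorial_groups[tg] = [] #creates new tg if not already present
--         tutorial_groups[tg].append(student) #adds the student to their tg
--     return tutorial_groups
-- ===== SOURCE B (Python) =====
-- def students_by_tg(student_data):
--     # Two-pass: collect distinct tutorial groups in first-occurrence order,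
--     # then build each group's list by filtering (stable, preserves A's order).
--     tgs = list(dict.fromkeys(s["Tutorial Group"] for s in student_data))
--     return {tg: [s for s in student_data if s["Tutorial Group"] == tg] for tg in tgs}
-- ===== Notes on version B (the rewrite author's own statement) =====
-- stated objective: alternative
-- what changed: Replaces the incremental dict-with-membership-test loop by an ordered dedup of the group keys followed by a per-key filter comprehension (segment-by-key instead of accumulate-by-append).
import Mathlib
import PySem

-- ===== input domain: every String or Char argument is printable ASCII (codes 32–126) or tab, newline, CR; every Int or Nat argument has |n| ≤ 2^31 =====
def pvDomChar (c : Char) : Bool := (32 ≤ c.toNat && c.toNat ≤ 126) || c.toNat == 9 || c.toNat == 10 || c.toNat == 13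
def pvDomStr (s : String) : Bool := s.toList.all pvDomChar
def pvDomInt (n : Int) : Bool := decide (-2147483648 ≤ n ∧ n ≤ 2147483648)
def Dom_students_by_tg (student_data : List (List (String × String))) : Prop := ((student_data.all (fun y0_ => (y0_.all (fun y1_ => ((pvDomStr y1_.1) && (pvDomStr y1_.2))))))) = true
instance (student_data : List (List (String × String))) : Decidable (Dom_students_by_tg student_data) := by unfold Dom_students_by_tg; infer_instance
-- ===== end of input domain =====

-- B groups by ordered key-dedup + per-key filter instead of A's incremental dict-append loop; same return value.


-- student["Tutorial Group"]: first-match lookup in the record (Python KeyError = none, excluded by Pre_; default "" is never reached inside Pre_)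
def tgOf (student : List (String × String)) : String :=
  ((PySem.Dict.mk student).get? "Tutorial Group").getD ""

-- ===== PORT A =====
def students_by_tg (student_data : List (List (String × String))) : List (String × List (List (String × String))) :=
  (student_data.foldl
    (fun tutorial_groups student =>
      let tg := tgOf student
      let tutorial_groups :=
        if tutorial_groups.contains tg then tutorial_groups
        else tutorial_groups.insert tg []
      tutorial_groups.modify tg [] (fun l => l ++ [student]))
    PySem.Dict.empty).items

-- ===== PORT B =====
def students_by_tg_alt (student_data : List (List (String × String))) : List (String × List (List (String × String))) :=
  let tgs := PySem.List.dedup (student_data.map tgOf)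
  tgs.map (fun tg => (tg, student_data.filter (fun s => tgOf s == tg)))

-- ===== PRECONDITION & SPEC =====
-- Pre_ excludes exactly the inputs where the Python (A and B alike) raises KeyError: a student record without a "Tutorial Group" key.
def Pre_students_by_tg (student_data : List (List (String × String))) : Prop :=
  ∀ s ∈ student_data, ((PySem.Dict.mk s).get? "Tutorial Group").isSome = true
instance (student_data : List (List (String × String))) : Decidable (Pre_students_by_tg student_data) := by unfold Pre_students_by_tg; infer_instance

def pvWitness_students_by_tg : (List (List (String × String))) :=
  [[("Tutorial Group", "G-1"), ("Name", "Ann")], [("Tutorial Group", "G-2"), ("Name", "Bob")], [("Tutorial Group", "G-1"), ("Name", "Cid")]]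

def Spec_students_by_tg (student_data : List (List (String × String))) (out : List (String × List (List (String × String)))) : Prop := out = students_by_tg_alt student_data
instance (student_data : List (List (String × String))) (out : List (String × List (List (String × String)))) : Decidable (Spec_students_by_tg student_data out) := by unfold Spec_students_by_tg; infer_instance

-- ===== CLAIM (what is proved, stated in full; the proofs are below) =====
def Claim_equal_students_by_tg : Prop := ∀ (student_data : List (List (String × String))), Dom_students_by_tg student_data → Pre_students_by_tg student_data → Spec_students_by_tg student_data (students_by_tg student_data)

-- ===== LEMMAS AND PROOFS =====

-- inserting a missing key with the default before 'modify' changes nothing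
theorem insert_modify_of_not_contains {ν : Type} (d : PySem.Dict String ν) (k : String)
    (v0 : ν) (f : ν → ν) (h : d.contains k = false) :
    (d.insert k v0).modify k v0 f = d.modify k v0 f := by
  have hins : (PySem.Dict.mk (d.items ++ [(k, v0)])) = d.insert k v0 := by
    apply PySem.Dict.ext
    rw [PySem.Dict.items_insert_of_not_contains]
    exact h
  have hk : ∀ p ∈ d.items, p.1 ≠ k := by
    intro p hp hpk
    have : k ∈ d.keys := by
      simp only [PySem.Dict.keys]
      exact List.mem_map.2 ⟨p, hp, hpk⟩
    rw [← PySem.Dict.contains_iff_mem_keys] at this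
    simp [h] at this
  simp only [PySem.Dict.modify, PySem.Dict.insert, h, Bool.false_eq_true, if_false,
    PySem.Dict.contains_mk, List.any_append, List.any_cons, BEq.rfl, List.any_nil,
    Bool.or_false, Bool.or_true, beq_iff_eq, List.map_append, List.map_cons, List.map_nil,
    if_true]
  rw [hins, PySem.Dict.getD_insert_self, PySem.Dict.getD_of_not_contains d v0 h]
  have hm : d.items.map (fun p => if p.1 = k then (k, f v0) else p) = d.items := by
    calc d.items.map (fun p => if p.1 = k then (k, f v0) else p)
        = d.items.map id := List.map_congr_left (fun p hp => by simp [hk p hp])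
      _ = d.items := List.map_id _
  rw [hm]

-- A's loop body ('if tg not in d: d[tg] = []' then append) is one modify-with-default step
theorem step_eq_modify (d : PySem.Dict String (List (List (String × String)))) (s : List (String × String)) :
    (let tg := tgOf s
     let d' := if d.contains tg then d else d.insert tg []
     d'.modify tg [] (fun l => l ++ [s])) = d.modify (tgOf s) [] (fun l => l ++ [s]) := by
  by_cases h : d.contains (tgOf s) = true
  · simp [h]
  · simp only [Bool.not_eq_true] at h
    simp only [h, Bool.false_eq_true, if_false]
    exact insert_modify_of_not_contains d (tgOf s) [] _ h

-- A's fold rewritten as a grouping fold over (key, student) pairs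
theorem foldA_eq (student_data : List (List (String × String))) :
    students_by_tg student_data =
      ((student_data.map (fun s => (tgOf s, s))).foldl
        (fun d p => d.modify p.1 [] (fun l => l ++ [p.2])) PySem.Dict.empty).items := by
  unfold students_by_tg
  rw [List.foldl_map]
  congr 1
  congr 1
  funext d s
  exact step_eq_modify d s

-- ===== VERDICT (by name: the statement is the Claim_ definition above) =====

theorem students_by_tg_spec : Claim_equal_students_by_tg := by
  intro sd _ _
  unfold Spec_students_by_tg
  rw [foldA_eq]
  set l := sd.map (fun s => (tgOf s, s)) with hl
  have hnd : ((l.foldl (fun d p => d.modify p.1 [] (fun v => v ++ [p.2])) PySem.Dict.empty)).keys.Nodup := by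
    apply PySem.Dict.nodup_keys_foldl_modify_key
    simp [PySem.Dict.keys_empty]
  have hkeys : ((l.foldl (fun d p => d.modify p.1 [] (fun v => v ++ [p.2])) PySem.Dict.empty)).keys
      = PySem.List.dedup (sd.map tgOf) := by
    have := PySem.Dict.keys_foldl_modify_key (l := l) (key := fun p => p.1)
      (d0 := ([] : List (List (String × String)))) (f := fun d p => (fun v => v ++ [p.2]))
      (d := PySem.Dict.empty)
    rw [this, PySem.Dict.keys_empty, PySem.Set.update_nil_left, hl, List.map_map,
      PySem.List.dedup_eq_ofList]
    rfl
  rw [PySem.Dict.items_eq_map_keys _ hnd [], hkeys]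
  unfold students_by_tg_alt
  apply List.map_congr_left
  intro k hk
  have hgd := PySem.Dict.getD_foldl_modify_append (l := l) (d := PySem.Dict.empty) (c := k)
  rw [PySem.Dict.getD_empty] at hgd
  rw [hgd, hl, List.filter_map, List.map_map]
  simp only [Function.comp_def, List.nil_append]
  simp
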